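-- pv_equiv track=rewrite | github.com/ProjectGleb/MindGraph | revision.py | headings_and_subheadings
-- ===== SOURCE A (Python) =====
-- def headings_and_subheadings(topics):
--     headings = {}
--     current_heading = None
--
--     for line in topics:
--         if line.startswith('- '):
--             current_heading = line[2:].strip()
--             headings[current_heading] = {}
--         elif line.startswith('\t- ') and current_heading:
--             parts = line[3:].strip().split('{')  # Split subheading and data
--             if len(parts) == 2:  # Ensure both parts are present
--                 subheading = parts[0].strip()
--                 data = parts[1].rstrip('}')  # Remove closing brace
--                 data_dict = {}
--                 for item in data.split(','):
--                     key_value = item.strip().split(':')  # Split key-value pairs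
--                     if len(key_value) == 2:  # Ensure key-value pair is valid
--                         key = key_value[0].strip()
--                         value = key_value[1].strip()
--                         data_dict[key] = value
--                 headings[current_heading][subheading] = data_dict
--
--     return headings
-- ===== SOURCE B (Python) =====
-- # Two-pass re-implementation: group lines into (heading, raw subheading lines) sections
-- # first, then build each heading's mapping, instead of one stateful loop.
--
-- def _parse_data(data):
--     d = {}
--     for item in data.split(','):
--         kv = item.strip().split(':')
--         if len(kv) == 2:
--             d[kv[0].strip()] = kv[1].strip()
--     return d
--
--
-- def _parse_section(raw_lines):
--     sub = {}
--     for r in raw_lines: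
--         parts = r.strip().split('{')
--         if len(parts) == 2:
--             sub[parts[0].strip()] = _parse_data(parts[1].rstrip('}'))
--     return sub
--
--
-- def headings_and_subheadings(topics):
--     # pass 1: group into sections (lines before any heading, or under an
--     # empty-named heading, collect nothing)
--     sections = []
--     for line in topics:
--         if line.startswith('- '):
--             sections.append((line[2:].strip(), []))
--         elif line.startswith('\t- ') and sections and sections[-1][0]:
--             sections[-1][1].append(line[3:])
--     # pass 2: build the result, later occurrences of a heading overwrite
--     headings = {}
--     for name, raw in sections:
--         headings[name] = _parse_section(raw)
--     return headings
-- ===== Notes on version B (the rewrite author's own statement) =====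
-- stated objective: alternative
-- what changed: Replaces A's single stateful loop (current_heading + in-place dict updates) with a two-pass group-then-map structure: pass 1 groups lines into an ordered list of (heading, raw subheading lines) sections, pass 2 builds each heading's mapping from its collected lines with factored-out parsing helpers.
import Mathlib
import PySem

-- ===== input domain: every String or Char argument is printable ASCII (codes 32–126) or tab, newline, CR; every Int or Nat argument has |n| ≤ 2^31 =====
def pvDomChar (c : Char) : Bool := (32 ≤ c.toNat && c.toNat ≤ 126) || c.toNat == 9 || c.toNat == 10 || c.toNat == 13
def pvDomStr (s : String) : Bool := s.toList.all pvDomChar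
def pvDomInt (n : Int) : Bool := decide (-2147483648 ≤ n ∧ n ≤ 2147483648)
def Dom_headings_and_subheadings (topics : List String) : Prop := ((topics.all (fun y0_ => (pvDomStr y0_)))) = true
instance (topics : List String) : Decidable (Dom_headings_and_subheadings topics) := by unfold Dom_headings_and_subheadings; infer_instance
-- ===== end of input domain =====

-- B regroups the single stateful loop into two passes (group lines into sections, then
-- build each heading's mapping); objective: alternative decomposition, same cost.


-- shared by both ports: Python's  data.rstrip('}')  — drop all trailing '}' (exact for a one-char strip set)
def pvRstripBrace (cs : List Char) : List Char :=
  (cs.reverse.dropWhile (fun c => c == '}')).reverse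

-- shared by both ports: flatten the nested PySem.Dict result into the association-list return type
def pvOut (d : PySem.Dict String (PySem.Dict String (PySem.Dict String String))) :
    List (String × List (String × List (String × String))) :=
  d.items.map (fun p => (p.1, p.2.items.map (fun q => (q.1, q.2.items))))

-- ===== PORT A =====
-- Python truthiness of current_heading (None or the empty string are falsy)
def pvTruthy : Option String → Bool
  | none => false
  | some s => !(s == "")

-- A's inner  for item in data.split(','): …  loop building data_dict
-- (kv.getD i [] is kv[i]; in range, guarded by the length == 2 check)
def pvDataDictA (data : List Char) : PySem.Dict String String :=
  (PySem.Chars.splitOn data [',']).foldl (fun dd item =>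
    let kv := PySem.Chars.splitOn (PySem.Chars.strip item) [':']
    if kv.length == 2 then
      dd.insert (String.ofList (PySem.Chars.strip (kv.getD 0 [])))
                (String.ofList (PySem.Chars.strip (kv.getD 1 [])))
    else dd) PySem.Dict.empty

-- one iteration of A's  for line in topics  loop; state = (headings, current_heading)
def pvStepA (st : PySem.Dict String (PySem.Dict String (PySem.Dict String String)) × Option String)
    (line : String) :
    PySem.Dict String (PySem.Dict String (PySem.Dict String String)) × Option String :=
  let cs := line.toList
  if PySem.Chars.startswith cs ['-', ' '] then
    let h := String.ofList (PySem.Chars.strip (cs.drop 2))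
    (st.1.insert h PySem.Dict.empty, some h)
  else if PySem.Chars.startswith cs ['\t', '-', ' '] && pvTruthy st.2 then
    let parts := PySem.Chars.splitOn (PySem.Chars.strip (cs.drop 3)) ['{']
    if parts.length == 2 then
      let sub := String.ofList (PySem.Chars.strip (parts.getD 0 []))
      let dd := pvDataDictA (pvRstripBrace (parts.getD 1 []))
      -- headings[current_heading][subheading] = data_dict
      (st.1.modify (st.2.getD "") PySem.Dict.empty (fun m => m.insert sub dd), st.2)
    else st
  else st

def headings_and_subheadings (topics : List String) :
    List (String × List (String × List (String × String))) :=
  pvOut (topics.foldl pvStepA (PySem.Dict.empty, none)).1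

-- ===== PORT B =====
-- Source B's _parse_data
def pvParseData (data : List Char) : PySem.Dict String String :=
  (PySem.Chars.splitOn data [',']).foldl (fun d item =>
    let kv := PySem.Chars.splitOn (PySem.Chars.strip item) [':']
    if kv.length == 2 then
      d.insert (String.ofList (PySem.Chars.strip (kv.getD 0 [])))
               (String.ofList (PySem.Chars.strip (kv.getD 1 [])))
    else d) PySem.Dict.empty

-- Source B's _parse_section
def pvParseSection (raws : List (List Char)) : PySem.Dict String (PySem.Dict String String) :=
  raws.foldl (fun sub r =>
    let parts := PySem.Chars.splitOn (PySem.Chars.strip r) ['{']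
    if parts.length == 2 then
      sub.insert (String.ofList (PySem.Chars.strip (parts.getD 0 [])))
                 (pvParseData (pvRstripBrace (parts.getD 1 [])))
    else sub) PySem.Dict.empty

-- one iteration of Source B's pass-1 grouping loop
def pvCollectStep (secs : List (String × List (List Char))) (line : String) :
    List (String × List (List Char)) :=
  let cs := line.toList
  if PySem.Chars.startswith cs ['-', ' '] then
    secs ++ [(String.ofList (PySem.Chars.strip (cs.drop 2)), [])]
  else
    match secs.getLast? with
    | some (n, raw) =>
        if PySem.Chars.startswith cs ['\t', '-', ' '] && !(n == "") then
          secs.dropLast ++ [(n, raw ++ [cs.drop 3])]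
        else secs
    | none => secs

def headings_and_subheadings_alt (topics : List String) :
    List (String × List (String × List (String × String))) :=
  pvOut ((topics.foldl pvCollectStep []).foldl
    (fun d p => d.insert p.1 (pvParseSection p.2)) PySem.Dict.empty)

-- ===== PRECONDITION & SPEC =====
def Spec_headings_and_subheadings (topics : List String) (out : List (String × List (String × List (String × String)))) : Prop := out = headings_and_subheadings_alt topics
instance (topics : List String) (out : List (String × List (String × List (String × String)))) : Decidable (Spec_headings_and_subheadings topics out) := by unfold Spec_headings_and_subheadings; infer_instance

-- ===== CLAIM (what is proved, stated in full; the proofs are below) =====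
def Claim_equal_headings_and_subheadings : Prop := ∀ (topics : List String), Dom_headings_and_subheadings topics → Spec_headings_and_subheadings topics (headings_and_subheadings topics)

-- ===== LEMMAS AND PROOFS =====

-- B's second pass, as a function of a section list
def pvPass2 (secs : List (String × List (List Char))) :
    PySem.Dict String (PySem.Dict String (PySem.Dict String String)) :=
  secs.foldl (fun d p => d.insert p.1 (pvParseSection p.2)) PySem.Dict.empty

-- A's current_heading, recovered from B's section list
def pvCur (secs : List (String × List (List Char))) : Option String :=
  secs.getLast?.map (·.1)

theorem pvPass2_concat (secs : List (String × List (List Char))) (p : String × List (List Char)) :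
    pvPass2 (secs ++ [p]) = (pvPass2 secs).insert p.1 (pvParseSection p.2) := by
  simp [pvPass2, List.foldl_append]

theorem pvParseSection_concat (raws : List (List Char)) (r : List Char) :
    pvParseSection (raws ++ [r]) =
      (let parts := PySem.Chars.splitOn (PySem.Chars.strip r) ['{']
       if parts.length == 2 then
         (pvParseSection raws).insert (String.ofList (PySem.Chars.strip (parts.getD 0 [])))
           (pvParseData (pvRstripBrace (parts.getD 1 [])))
       else pvParseSection raws) := by
  simp [pvParseSection, List.foldl_append]

-- the heart: one line of A's loop from state (pvPass2 secs, pvCur secs) lands on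
-- (pvPass2, pvCur) of B's grouping step
theorem pvStep_eq (secs : List (String × List (List Char))) (line : String) :
    pvStepA (pvPass2 secs, pvCur secs) line =
      (pvPass2 (pvCollectStep secs line), pvCur (pvCollectStep secs line)) := by
  by_cases h1 : PySem.Chars.startswith line.toList ['-', ' '] = true
  · simp only [pvStepA, pvCollectStep, h1, if_pos]
    rw [pvPass2_concat]
    simp only [Prod.mk.injEq]
    exact ⟨rfl, by simp [pvCur]⟩
  · cases hL : secs.getLast? with
    | none =>
      have hsecs : secs = [] := List.getLast?_eq_none_iff.mp hL
      subst hsecs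
      simp [pvStepA, pvCollectStep, h1, pvCur, pvTruthy]
    | some p =>
      obtain ⟨n, raw⟩ := p
      obtain ⟨init, hinit⟩ := List.getLast?_eq_some_iff.mp hL
      have hcur : pvCur secs = some n := by simp [pvCur, hL]
      by_cases h2 : (PySem.Chars.startswith line.toList ['\t', '-', ' '] && !(n == "")) = true
      · subst hinit
        simp only [pvStepA, pvCollectStep, h1, if_neg, Bool.false_eq_true, not_false_iff,
          hL, hcur, pvTruthy, h2, if_pos, List.dropLast_concat]
        rw [pvPass2_concat, pvPass2_concat, pvParseSection_concat]
        by_cases h3 : ((PySem.Chars.splitOn (PySem.Chars.strip (line.toList.drop 3)) ['{']).length == 2) = true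
        · simp only [h3, if_pos, Prod.mk.injEq]
          refine ⟨?_, by simp [pvCur]⟩
          simp [PySem.Dict.modify, PySem.Dict.insert_insert_self, pvDataDictA, pvParseData]
        · simp only [h3, Bool.false_eq_true, if_neg, not_false_iff, Prod.mk.injEq]
          simp [pvCur]
      · subst hinit
        simp [pvStepA, pvCollectStep, h1, hL, hcur, pvTruthy, h2]

theorem pvInv (topics : List String) : ∀ (secs : List (String × List (List Char))),
    topics.foldl pvStepA (pvPass2 secs, pvCur secs) =
      (pvPass2 (topics.foldl pvCollectStep secs), pvCur (topics.foldl pvCollectStep secs)) := by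
  induction topics with
  | nil => intro secs; rfl
  | cons line rest ih =>
    intro secs
    simp only [List.foldl_cons, pvStep_eq secs line]
    exact ih (pvCollectStep secs line)

-- ===== VERDICT (by name: the statement is the Claim_ definition above) =====
theorem headings_and_subheadings_spec : Claim_equal_headings_and_subheadings := by
  intro topics _
  unfold Spec_headings_and_subheadings headings_and_subheadings headings_and_subheadings_alt
  have h := pvInv topics []
  simp only [pvPass2, pvCur, List.foldl_nil, List.getLast?_nil, Option.map_none] at h
  rw [h]
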